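-- pv_equiv track=rewrite | github.com/thedeclark/CSE-480-Database-Systems | project (2).py | write_csv_string
-- ===== SOURCE A (Python) =====
-- def write_csv_string(data):
--     return_string = ''
--     limit = len(data)-1
--     for v in data.values():
--         limit2 = len(v)
--         break
--     count = 0
--     count2 = 0
--     count3 = 0
--     for k in data.keys():
--         if count != limit:
--             return_string += (k + ',')
--             count += 1
--             continue
--         count3+=1
--         return_string += (k + '\n')
--     while count2 != limit2:
--         count = 0
--         for v in data.values():
--             if count != limit:
--                 return_string += (v[count2] + ',')
--                 count += 1
--                 continue
--             return_string += (v[count2] + '\n')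
--         count2 += 1
--
--     return return_string
-- ===== SOURCE B (Python) =====
-- def write_csv_string(data):
--     cols = list(data.values())
--     n = len(cols[0])
--     lines = [list(data.keys())] + [[] for _ in range(n)]
--     for col in cols:
--         for i, cell in enumerate(col[:n]):
--             lines[i + 1].append(cell)
--     return ''.join(','.join(line) + '\n' for line in lines)
-- ===== Notes on version B (the rewrite author's own statement) =====
-- stated objective: alternative
-- what changed: A emits the output row-major with nested counter loops and a while; B works column-major: a single pass over the value columns appends each cell into a per-output-line buffer (header buffer pre-filled with the keys), then one join pass produces the string.
import Mathlib
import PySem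

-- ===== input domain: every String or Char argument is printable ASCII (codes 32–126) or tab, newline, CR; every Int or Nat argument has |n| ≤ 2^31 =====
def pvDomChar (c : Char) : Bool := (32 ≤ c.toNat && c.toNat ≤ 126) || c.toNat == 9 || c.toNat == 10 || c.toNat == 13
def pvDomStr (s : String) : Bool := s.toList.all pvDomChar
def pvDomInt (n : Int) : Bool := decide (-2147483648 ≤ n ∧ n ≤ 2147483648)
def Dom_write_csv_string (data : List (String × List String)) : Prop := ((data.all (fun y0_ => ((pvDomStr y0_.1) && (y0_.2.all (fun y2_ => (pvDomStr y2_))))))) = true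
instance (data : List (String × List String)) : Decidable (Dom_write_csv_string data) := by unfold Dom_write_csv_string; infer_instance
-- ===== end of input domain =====

-- B generates the output column-major: one pass over the value columns appending each cell
-- to a per-output-line buffer, then a single join pass — instead of A's row-major nested
-- loops with three counters; objective: alternative decomposition, same cost.

-- ===== PORT A =====
-- 'for k in data.keys()' with counters count/limit and the dead counter count3 (kept as state)
def pvAKeyLoop (ks : List String) (count limit count3 : Int) (acc : List Char) : List Char :=
  match ks with
  | [] => acc
  | k :: rest =>
    if count ≠ limit then pvAKeyLoop rest (count + 1) limit count3 (acc ++ k.toList ++ [','])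
    else pvAKeyLoop rest count limit (count3 + 1) (acc ++ k.toList ++ ['\n'])

-- inner 'for v in data.values()' of the while body; v[count2] is exact under Pre_ (in range)
def pvARowPass (vs : List (List String)) (count limit : Int) (count2 : Nat) (acc : List Char) : List Char :=
  match vs with
  | [] => acc
  | v :: rest =>
    if count ≠ limit then
      pvARowPass rest (count + 1) limit count2 (acc ++ (PySem.List.pyGetD v (count2 : Int) "").toList ++ [','])
    else
      pvARowPass rest count limit count2 (acc ++ (PySem.List.pyGetD v (count2 : Int) "").toList ++ ['\n'])

-- 'while count2 != limit2': count2 grows by 1 each pass, so the loop runs limit2 - count2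
-- more times; that remaining count is the structural fuel
def pvAWhile (vs : List (List String)) (limit : Int) (count2 fuel : Nat) (acc : List Char) : List Char :=
  match fuel with
  | 0 => acc
  | fuel' + 1 => pvAWhile vs limit (count2 + 1) fuel' (pvARowPass vs 0 limit count2 acc)

def write_csv_string (data : List (String × List String)) : String :=
  let items := (PySem.Dict.ofList data).items  -- the dict A receives, as its ordered items
  match items with
  | [] => ""  -- Python raises UnboundLocalError here (limit2 never bound); excluded by Pre_
  | (_, v0) :: _ =>
    let limit : Int := (items.length : Int) - 1
    let limit2 : Nat := v0.length  -- length of the first column (the for/break loop)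
    String.ofList (pvAWhile (items.map (·.2)) limit 0 limit2
      (pvAKeyLoop (items.map (·.1)) 0 limit 0 []))

-- ===== PORT B =====
-- inner 'for i, cell in enumerate(col[:n]): lines[i+1].append(cell)' of B: the key line
-- (lines[0]) is untouched; each of the first len(col[:n]) buffers gets the cell appended
def pvBAppendEach (t : List (List String)) (cs : List String) : List (List String) :=
  match t, cs with
  | t, [] => t
  | [], _ => []
  | line :: t, cell :: cs => (line ++ [cell]) :: pvBAppendEach t cs

-- one iteration of B's 'for col in cols' loop on the full lines table
def pvBAddCol (n : Nat) (lines : List (List String)) (col : List String) : List (List String) :=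
  match lines with
  | [] => []
  | h :: t => h :: pvBAppendEach t (col.take n)  -- col[:n] = col.take n (exact: n ≥ 0)

def write_csv_string_alt (data : List (String × List String)) : String :=
  let items := (PySem.Dict.ofList data).items
  let cols := items.map (·.2)    -- cols = list(data.values())
  match cols with
  | [] => ""  -- cols[0] raises IndexError on the empty dict; excluded by Pre_
  | c0 :: _ =>
    let n := c0.length
    let lines0 : List (List String) := (items.map (·.1)) :: (List.range n).map (fun _ => [])
    let lines := cols.foldl (pvBAddCol n) lines0
    String.ofList (PySem.Chars.join []
      (lines.map (fun line => PySem.Chars.join [','] (line.map String.toList) ++ ['\n'])))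

-- ===== PRECONDITION & SPEC =====
-- Pre_ excludes exactly the inputs where Python A raises: the empty dict (UnboundLocalError
-- on limit2) and dicts with some column shorter than the first column (IndexError on v[count2]).
def Pre_write_csv_string (data : List (String × List String)) : Prop :=
  (PySem.Dict.ofList data).items ≠ [] ∧
  ∀ p ∈ (PySem.Dict.ofList data).items,
    (((PySem.Dict.ofList data).items.headD ("", [])).2.length ≤ p.2.length)
instance (data : List (String × List String)) : Decidable (Pre_write_csv_string data) := by
  unfold Pre_write_csv_string; infer_instance
def pvWitness_write_csv_string : (List (String × List String)) := [("x", ["1", "2"]), ("y", ["3", "4"])]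

def Spec_write_csv_string (data : List (String × List String)) (out : String) : Prop := out = write_csv_string_alt data
instance (data : List (String × List String)) (out : String) : Decidable (Spec_write_csv_string data out) := by unfold Spec_write_csv_string; infer_instance

-- ===== CLAIM (what is proved, stated in full; the proofs are below) =====
def Claim_equal_write_csv_string : Prop := ∀ (data : List (String × List String)), Dom_write_csv_string data → Pre_write_csv_string data → Spec_write_csv_string data (write_csv_string data)

-- ===== LEMMAS AND PROOFS =====

theorem pvJoinEmpty_eq_flatten (l : List (List Char)) : PySem.Chars.join [] l = l.flatten := by
  induction l with
  | nil => simp [PySem.Chars.join_nil]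
  | cons x rest ih =>
    cases rest with
    | nil => simp [PySem.Chars.join_singleton]
    | cons y t => simp [PySem.Chars.join_cons_cons, ih]

theorem pvAKeyLoop_eq (ks : List String) (hne : ks ≠ []) :
    ∀ (count count3 : Int) (acc : List Char),
      pvAKeyLoop ks count (count + (ks.length : Int) - 1) count3 acc =
        acc ++ PySem.Chars.join [','] (ks.map (·.toList)) ++ ['\n'] := by
  induction ks with
  | nil => exact absurd rfl hne
  | cons k rest ih =>
    intro count count3 acc
    cases rest with
    | nil =>
      simp [pvAKeyLoop, PySem.Chars.join_singleton]
    | cons k' t =>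
      have hcnt : count ≠ count + ((k :: k' :: t).length : Int) - 1 := by
        simp only [List.length_cons]; push_cast; omega
      have hlim : count + ((k :: k' :: t).length : Int) - 1
          = (count + 1) + ((k' :: t).length : Int) - 1 := by
        simp only [List.length_cons]; push_cast; omega
      rw [pvAKeyLoop, if_pos hcnt, hlim, ih (by simp)]
      simp [PySem.Chars.join_cons_cons]

theorem pvARowPass_eq (vs : List (List String)) (hne : vs ≠ []) (count2 : Nat) :
    ∀ (count : Int) (acc : List Char),
      pvARowPass vs count (count + (vs.length : Int) - 1) count2 acc =
        acc ++ PySem.Chars.join [','] (vs.map (fun v => (PySem.List.pyGetD v (count2 : Int) "").toList)) ++ ['\n'] := by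
  induction vs with
  | nil => exact absurd rfl hne
  | cons v rest ih =>
    intro count acc
    cases rest with
    | nil =>
      simp [pvARowPass, PySem.Chars.join_singleton]
    | cons v' t =>
      have hcnt : count ≠ count + ((v :: v' :: t).length : Int) - 1 := by
        simp only [List.length_cons]; push_cast; omega
      have hlim : count + ((v :: v' :: t).length : Int) - 1
          = (count + 1) + ((v' :: t).length : Int) - 1 := by
        simp only [List.length_cons]; push_cast; omega
      rw [pvARowPass, if_pos hcnt, hlim, ih (by simp)]
      simp [PySem.Chars.join_cons_cons]

theorem pvAWhile_eq (vs : List (List String)) (hne : vs ≠ []) :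
    ∀ (fuel count2 : Nat) (acc : List Char),
      pvAWhile vs ((vs.length : Int) - 1) count2 fuel acc =
        acc ++ ((List.range fuel).map (fun j =>
          PySem.Chars.join [','] (vs.map (fun v => (PySem.List.pyGetD v ((count2 + j : Nat) : Int) "").toList)) ++ ['\n'])).flatten := by
  intro fuel
  induction fuel with
  | zero => intro count2 acc; simp [pvAWhile]
  | succ n ih =>
    intro count2 acc
    have hrow := pvARowPass_eq vs hne count2 0
    simp only [zero_add] at hrow
    rw [pvAWhile, ih, hrow, List.range_succ_eq_map]
    simp only [List.map_cons, List.map_map, List.flatten_cons, Nat.add_zero]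
    have h1 : ∀ j, count2 + 1 + j = count2 + (j + 1) := by omega
    simp [Function.comp_def, h1, List.append_assoc, Nat.succ_eq_add_one]

-- B-side: with equal lengths the append-each pass is a zipWith
theorem pvBAppendEach_eq_zipWith (t : List (List String)) (cs : List String)
    (h : t.length = cs.length) :
    pvBAppendEach t cs = List.zipWith (fun line cell => line ++ [cell]) t cs := by
  induction t generalizing cs with
  | nil => cases cs with
    | nil => rfl
    | cons c cs' => simp at h
  | cons line t ih =>
    cases cs with
    | nil => simp at h
    | cons c cs' =>
      simp only [pvBAppendEach, List.zipWith_cons_cons]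
      rw [ih cs' (by simpa using h)]

-- B-side fold invariant: the tail buffers collect, at index i, the i-th cell of every column
theorem pvBFoldTail_eq (n : Nat) (cols : List (List String)) (hcols : ∀ c ∈ cols, n ≤ c.length) :
    ∀ t : List (List String), t.length = n →
      cols.foldl (fun acc col => pvBAppendEach acc (col.take n)) t
        = (List.range n).map (fun i => t.getD i [] ++ cols.map (fun c => c.getD i "")) := by
  induction cols with
  | nil =>
    intro t ht
    simp only [List.foldl_nil, List.map_nil, List.append_nil]
    apply List.ext_getElem
    · simp [ht]
    · intro i h1 h2
      simp only [List.length_range, List.length_map] at h2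
      simp only [List.getElem_map, List.getElem_range]
      rw [List.getD_eq_getElem t [] (by omega)]
  | cons c cs ih =>
    intro t ht
    have hc : n ≤ c.length := hcols c (by simp)
    have hlen : (c.take n).length = n := by simp [hc]
    rw [List.foldl_cons, pvBAppendEach_eq_zipWith t (c.take n) (by rw [ht, hlen]),
      ih (fun c' hc' => hcols c' (by simp [hc'])) _ (by simp [ht, hc])]
    apply List.map_congr_left
    intro i hi
    have hin : i < n := List.mem_range.mp hi
    rw [List.getD_eq_getElem _ [] (by simp [ht, hc]; omega),
      List.getElem_zipWith, List.getElem_take,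
      List.getD_eq_getElem t [] (by omega), List.map_cons,
      List.getD_eq_getElem c "" (by omega)]
    simp [List.append_assoc]

-- B's fold keeps the key line in place and folds the tail
theorem pvBFold_cons (n : Nat) (cols : List (List String)) (h : List String)
    (t : List (List String)) :
    cols.foldl (pvBAddCol n) (h :: t)
      = h :: cols.foldl (fun acc col => pvBAppendEach acc (col.take n)) t := by
  induction cols generalizing t with
  | nil => rfl
  | cons c cs ih => simp only [List.foldl_cons, pvBAddCol]; exact ih _

theorem write_csv_string_spec_aux (data : List (String × List String))
    (h : Pre_write_csv_string data) :
    write_csv_string data = write_csv_string_alt data := by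
  obtain ⟨hne, hlen⟩ := h
  unfold write_csv_string write_csv_string_alt
  cases hitems : (PySem.Dict.ofList data).items with
  | nil => exact absurd hitems hne
  | cons p rest =>
    obtain ⟨k0, v0⟩ := p
    -- A's characterisation
    have hkeys := pvAKeyLoop_eq (((k0, v0) :: rest).map (·.1)) (by simp) 0 0 []
    have hvals := pvAWhile_eq (((k0, v0) :: rest).map (·.2)) (by simp) v0.length 0
    simp only [List.nil_append, zero_add, List.map_cons, List.length_cons, List.length_map] at hkeys hvals
    -- columns are at least as long as the first one
    have hc : ∀ c ∈ (v0 :: rest.map (·.2)), v0.length ≤ c.length := by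
      intro c hcmem
      have : c ∈ (((k0, v0) :: rest).map (·.2)) := by simpa using hcmem
      obtain ⟨q, hq, hqc⟩ := List.mem_map.mp this
      have := hlen q (hitems ▸ hq)
      simp only [hitems, List.headD_cons] at this
      exact hqc ▸ this
    simp only [List.map_cons, List.length_cons]
    rw [hkeys, hvals, pvBFold_cons,
      pvBFoldTail_eq v0.length (v0 :: rest.map (·.2)) hc _ (by simp),
      List.map_cons, pvJoinEmpty_eq_flatten, List.flatten_cons]
    apply congrArg
    congr 1
    apply congrArg
    rw [List.map_map]
    apply List.map_congr_left
    intro j hj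
    simp [Function.comp_def, List.map_map, PySem.List.pyGetD_natCast, List.getD]

-- ===== VERDICT (by name: the statement is the Claim_ definition above) =====
theorem write_csv_string_spec : Claim_equal_write_csv_string := by
  intro data _ hpre
  exact write_csv_string_spec_aux data hpre
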